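-- pv_equiv track=rewrite | github.com/AdamZhouSE/pythonHomework | Code/CodeRecords/2974/60605/263323.py | howManyAntiGoodSubstrs
-- ===== SOURCE A (Python) =====
-- def isPositiveCycle(s: str) -> bool:
--     if len(s) % 2 == 0: return False
--     ss = list(s)
--     cc = ss.copy()
--     cc.reverse()
--     return ss == cc
--
-- def howManyAntiGoodSubstrs(s: str) -> int:
--     sets = set()
--     leng = len(s)
--     cnt = 0
--     for i in range(0, leng):
--         for j in range(i, leng):
--             if not isPositiveCycle(s[i:j+1]):
--                 sets.add(s[i:j+1])
--     return len(sets)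
-- ===== SOURCE B (Python) =====
-- def howManyAntiGoodSubstrs(s: str) -> int:
--     # count all distinct substrings, then subtract the distinct odd-length
--     # palindromic substrings, found by expanding around each center
--     n = len(s)
--     subs = {s[i:j + 1] for i in range(n) for j in range(i, n)}
--     pals = set()
--     for c in range(n):
--         k = 0
--         while k <= c and c + k < n and s[c - k] == s[c + k]:
--             pals.add(s[c - k:c + k + 1])
--             k += 1
--     return len(subs) - len(pals)
-- ===== Notes on version B (the rewrite author's own statement) =====
-- stated objective: faster
-- what changed: A runs a list-copy-and-reverse odd-palindrome test on every one of the O(n^2) enumerated substrings; B collects all distinct substrings with no per-substring test and separately gathers the distinct odd palindromic substrings by expanding around each of the n centers, returning the difference of the two set sizes.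
import Mathlib
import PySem

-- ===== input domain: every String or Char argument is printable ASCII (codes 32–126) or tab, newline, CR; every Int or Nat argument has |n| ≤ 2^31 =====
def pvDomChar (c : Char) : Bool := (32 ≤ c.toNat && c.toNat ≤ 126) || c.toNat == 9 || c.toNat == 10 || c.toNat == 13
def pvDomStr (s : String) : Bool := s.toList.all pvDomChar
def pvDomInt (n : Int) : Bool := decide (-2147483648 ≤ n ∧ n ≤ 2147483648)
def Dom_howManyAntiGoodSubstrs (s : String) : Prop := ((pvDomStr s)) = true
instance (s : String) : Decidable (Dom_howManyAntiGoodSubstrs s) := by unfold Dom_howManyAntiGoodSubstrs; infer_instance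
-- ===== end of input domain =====

-- B replaces A's per-substring palindrome test inside the double enumeration by
-- "all distinct substrings minus distinct odd palindromic substrings found by center expansion".

-- ===== PORT A =====
def isPositiveCycle (s : String) : Bool :=
  if PySem.Int.mod (PySem.Str.len s) 2 == 0 then false
  else
    let ss := s.toList
    let cc := ss.reverse
    ss == cc

def howManyAntiGoodSubstrs (s : String) : Int :=
  let leng := PySem.Str.len s
  let sets :=
    (PySem.List.pyRange 0 leng 1).foldl (fun sets i =>
      (PySem.List.pyRange i leng 1).foldl (fun sets j =>
        if !isPositiveCycle (PySem.Str.slice s (some i) (some (j + 1))) then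
          PySem.Set.add sets (PySem.Str.slice s (some i) (some (j + 1)))
        else sets) sets) PySem.Set.empty
  PySem.Set.len sets

-- ===== PORT B =====
-- the 'while k <= c and c + k < n and s[c-k] == s[c+k]' expansion loop of Source B
def pvExpand (s : String) (n c : Int) (acc : PySem.Set String) (k : Int) : PySem.Set String :=
  if h : k ≤ c ∧ c + k < n ∧ PySem.Str.pyGet? s (c - k) = PySem.Str.pyGet? s (c + k) then
    pvExpand s n c (PySem.Set.add acc (PySem.Str.slice s (some (c - k)) (some (c + k + 1)))) (k + 1)
  else acc
termination_by (c + 1 - k).toNat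
decreasing_by omega

def howManyAntiGoodSubstrs_alt (s : String) : Int :=
  let n := PySem.Str.len s
  let subs :=
    (PySem.List.pyRange 0 n 1).foldl (fun acc i =>
      (PySem.List.pyRange i n 1).foldl (fun acc j =>
        PySem.Set.add acc (PySem.Str.slice s (some i) (some (j + 1)))) acc) PySem.Set.empty
  let pals :=
    (PySem.List.pyRange 0 n 1).foldl (fun acc c => pvExpand s n c acc 0) PySem.Set.empty
  PySem.Set.len subs - PySem.Set.len pals

-- ===== PRECONDITION & SPEC =====
def Spec_howManyAntiGoodSubstrs (s : String) (out : Int) : Prop := out = howManyAntiGoodSubstrs_alt s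
instance (s : String) (out : Int) : Decidable (Spec_howManyAntiGoodSubstrs s out) := by unfold Spec_howManyAntiGoodSubstrs; infer_instance

-- ===== CLAIM (what is proved, stated in full; the proofs are below) =====
def Claim_equal_howManyAntiGoodSubstrs : Prop := ∀ (s : String), Dom_howManyAntiGoodSubstrs s → Spec_howManyAntiGoodSubstrs s (howManyAntiGoodSubstrs s)

-- ===== LEMMAS AND PROOFS =====

-- the slice s[i:j+1] both ports build
def pvSl (s : String) (i j : Int) : String := PySem.Str.slice s (some i) (some (j + 1))

-- list of all substrings s[i:j+1], 0 ≤ i ≤ j < len s, as both ports enumerate them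
def pvLAll (s : String) : List String :=
  (PySem.List.pyRange 0 (PySem.Str.len s) 1).flatMap (fun i =>
    (PySem.List.pyRange i (PySem.Str.len s) 1).map (pvSl s i))

-- ----- generic fold lemmas -----
lemma pv_mem_foldl_of_step {β : Type} (l : List β) (g : PySem.Set String → β → PySem.Set String)
    (Q : β → String → Prop) (hg : ∀ acc i t, t ∈ g acc i ↔ t ∈ acc ∨ Q i t) :
    ∀ acc t, t ∈ l.foldl g acc ↔ t ∈ acc ∨ ∃ i ∈ l, Q i t := by
  induction l with
  | nil => simp
  | cons x xs ih =>
    intro acc t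
    simp only [List.foldl_cons, ih, hg, List.mem_cons]
    constructor
    · rintro ((h | h) | ⟨i, hi, hq⟩)
      · exact Or.inl h
      · exact Or.inr ⟨x, Or.inl rfl, h⟩
      · exact Or.inr ⟨i, Or.inr hi, hq⟩
    · rintro (h | ⟨i, (rfl | hi), hq⟩)
      · exact Or.inl (Or.inl h)
      · exact Or.inl (Or.inr hq)
      · exact Or.inr ⟨i, hi, hq⟩

lemma pv_nodup_foldl_of_step {β : Type} (l : List β) (g : PySem.Set String → β → PySem.Set String)
    (hg : ∀ acc i, acc.Nodup → (g acc i).Nodup) :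
    ∀ acc : PySem.Set String, acc.Nodup → (l.foldl g acc).Nodup := by
  induction l with
  | nil => intro acc h; simpa using h
  | cons x xs ih => intro acc h; exact ih _ (hg _ _ h)

-- ----- membership / nodup of A's set -----
lemma pv_memA (s : String) (t : String) :
    t ∈ (PySem.List.pyRange 0 (PySem.Str.len s) 1).foldl (fun sets i =>
      (PySem.List.pyRange i (PySem.Str.len s) 1).foldl (fun sets j =>
        if !isPositiveCycle (PySem.Str.slice s (some i) (some (j + 1))) then
          PySem.Set.add sets (PySem.Str.slice s (some i) (some (j + 1)))
        else sets) sets) PySem.Set.empty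
    ↔ t ∈ pvLAll s ∧ isPositiveCycle t = false := by
  rw [pv_mem_foldl_of_step _ _
    (fun i t => ∃ j ∈ PySem.List.pyRange i (PySem.Str.len s) 1,
        isPositiveCycle (pvSl s i j) = false ∧ t = pvSl s i j)
    (fun acc i t => by
      rw [pv_mem_foldl_of_step _ _
        (fun j t => isPositiveCycle (pvSl s i j) = false ∧ t = pvSl s i j)
        (fun acc j t => by
          by_cases hc : isPositiveCycle (PySem.Str.slice s (some i) (some (j + 1))) = false
          · simp [hc, PySem.Set.mem_add, pvSl]
          · simp only [Bool.not_eq_false] at hc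
            simp [hc, pvSl])])]
  simp only [PySem.Set.empty]
  constructor
  · rintro (h | ⟨i, hi, j, hj, hc, rfl⟩)
    · simp at h
    · exact ⟨by simp only [pvLAll, List.mem_flatMap]; exact ⟨i, hi, List.mem_map_of_mem hj⟩, hc⟩
  · rintro ⟨hmem, hc⟩
    simp only [pvLAll, List.mem_flatMap, List.mem_map] at hmem
    obtain ⟨i, hi, j, hj, rfl⟩ := hmem
    exact Or.inr ⟨i, hi, j, hj, hc, rfl⟩

lemma pv_nodupA (s : String) :
    ((PySem.List.pyRange 0 (PySem.Str.len s) 1).foldl (fun sets i =>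
      (PySem.List.pyRange i (PySem.Str.len s) 1).foldl (fun sets j =>
        if !isPositiveCycle (PySem.Str.slice s (some i) (some (j + 1))) then
          PySem.Set.add sets (PySem.Str.slice s (some i) (some (j + 1)))
        else sets) sets) (PySem.Set.empty : PySem.Set String)).Nodup := by
  refine pv_nodup_foldl_of_step _ _ (fun acc i h => ?_) _ (by simp [PySem.Set.empty])
  refine pv_nodup_foldl_of_step _ _ (fun acc j h => ?_) _ h
  split
  · exact PySem.Set.nodup_add _ _ h
  · exact h

-- ----- membership / nodup of B's subs set -----
lemma pv_memSubs (s : String) (t : String) :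
    t ∈ (PySem.List.pyRange 0 (PySem.Str.len s) 1).foldl (fun acc i =>
      (PySem.List.pyRange i (PySem.Str.len s) 1).foldl (fun acc j =>
        PySem.Set.add acc (PySem.Str.slice s (some i) (some (j + 1)))) acc) PySem.Set.empty
    ↔ t ∈ pvLAll s := by
  rw [pv_mem_foldl_of_step _ _
    (fun i t => ∃ j ∈ PySem.List.pyRange i (PySem.Str.len s) 1, t = pvSl s i j)
    (fun acc i t => by
      rw [pv_mem_foldl_of_step _ _ (fun j t => t = pvSl s i j)
        (fun acc j t => by simp [PySem.Set.mem_add, pvSl])])]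
  simp only [PySem.Set.empty, pvLAll, List.mem_flatMap, List.mem_map]
  constructor
  · rintro (h | ⟨i, hi, j, hj, rfl⟩)
    · simp at h
    · exact ⟨i, hi, j, hj, rfl⟩
  · rintro ⟨i, hi, j, hj, rfl⟩
    exact Or.inr ⟨i, hi, j, hj, rfl⟩

lemma pv_nodupSubs (s : String) :
    ((PySem.List.pyRange 0 (PySem.Str.len s) 1).foldl (fun acc i =>
      (PySem.List.pyRange i (PySem.Str.len s) 1).foldl (fun acc j =>
        PySem.Set.add acc (PySem.Str.slice s (some i) (some (j + 1)))) acc)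
      (PySem.Set.empty : PySem.Set String)).Nodup := by
  refine pv_nodup_foldl_of_step _ _ (fun acc i h => ?_) _ (by simp [PySem.Set.empty])
  exact pv_nodup_foldl_of_step _ _ (fun acc j h => PySem.Set.nodup_add _ _ h) _ h

-- ----- membership / nodup of B's pals set -----
lemma pv_mem_pvExpand (s : String) (n c : Int) :
    ∀ (k : Int) (acc : PySem.Set String) (t : String),
      t ∈ pvExpand s n c acc k ↔ t ∈ acc ∨ ∃ m : Int, k ≤ m ∧
        (∀ j : Int, k ≤ j → j ≤ m →
          j ≤ c ∧ c + j < n ∧ PySem.Str.pyGet? s (c - j) = PySem.Str.pyGet? s (c + j)) ∧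
        t = pvSl s (c - m) (c + m) := by
  intro k acc t
  fun_induction pvExpand s n c acc k with
  | case1 acc k h ih =>
    rw [ih]
    simp only [PySem.Set.mem_add]
    constructor
    · rintro ((h0 | rfl) | ⟨m, hm, hcond, rfl⟩)
      · exact Or.inl h0
      · refine Or.inr ⟨k, le_refl _, ?_, ?_⟩
        · intro j h1 h2
          have : j = k := le_antisymm h2 h1
          subst this; exact h
        · simp [pvSl]
      · refine Or.inr ⟨m, by omega, ?_, rfl⟩
        intro j h1 h2
        rcases eq_or_lt_of_le h1 with rfl | hlt
        · exact h
        · exact hcond j (by omega) h2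
    · rintro (h0 | ⟨m, hm, hcond, rfl⟩)
      · exact Or.inl (Or.inl h0)
      · rcases eq_or_lt_of_le hm with rfl | hlt
        · refine Or.inl (Or.inr ?_)
          simp [pvSl]
        · exact Or.inr ⟨m, by omega, fun j h1 h2 => hcond j (by omega) h2, rfl⟩
  | case2 acc k h =>
    constructor
    · exact Or.inl
    · rintro (h0 | ⟨m, hm, hcond, rfl⟩)
      · exact h0
      · exact absurd (hcond k (le_refl _) hm) h

lemma pv_nodup_pvExpand (s : String) (n c : Int) :
    ∀ (k : Int) (acc : PySem.Set String), acc.Nodup → (pvExpand s n c acc k).Nodup := by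
  intro k acc h
  fun_induction pvExpand s n c acc k with
  | case1 acc k hc ih => exact ih (PySem.Set.nodup_add _ _ h)
  | case2 acc k hc => exact h

-- ----- characterization of the expansion loop's harvest: exactly the odd palindromic substrings -----
lemma pv_rev_iff (l : List Char) (c m : Nat) (hm : m ≤ c) (hcm : c + m < l.length) :
    (((l.drop (c-m)).take (2*m+1)).reverse = (l.drop (c-m)).take (2*m+1))
      ↔ ∀ d : Nat, d ≤ m → l[c-d]? = l[c+d]? := by
  set t := (l.drop (c-m)).take (2*m+1) with ht
  have hlen : t.length = 2*m+1 := by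
    simp only [ht, List.length_take, List.length_drop]; omega
  have hget : ∀ p : Nat, p < 2*m+1 → t[p]? = l[c-m+p]? := by
    intro p hp
    simp only [ht, List.getElem?_take, List.getElem?_drop, if_pos hp]
  constructor
  · intro hrev d hd
    have h1 : t[m-d]? = l[c-d]? := by
      rw [hget (m-d) (by omega)]; congr 1; omega
    have h2 : t[m+d]? = l[c+d]? := by
      rw [hget (m+d) (by omega)]; congr 1; omega
    have h3 : t.reverse[m-d]? = t[m-d]? := by rw [hrev]
    rw [List.getElem?_reverse (by omega)] at h3
    have h4 : t.length - 1 - (m-d) = m+d := by omega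
    rw [h4] at h3
    rw [← h1, ← h3, h2]
  · intro hpair
    apply List.ext_getElem?
    intro p
    by_cases hp : p < 2*m+1
    · rw [List.getElem?_reverse (by omega), hlen]
      have h5 : 2*m+1-1-p = 2*m-p := by omega
      rw [h5, hget p hp, hget (2*m-p) (by omega)]
      by_cases hpm : p ≤ m
      · have e1 : c-m+p = c-(m-p) := by omega
        have e2 : c-m+(2*m-p) = c+(m-p) := by omega
        rw [e1, e2]
        exact (hpair (m-p) (by omega)).symm
      · have e1 : c-m+p = c+(p-m) := by omega
        have e2 : c-m+(2*m-p) = c-(p-m) := by omega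
        rw [e1, e2]
        exact hpair (p-m) (by omega)
    · rw [List.getElem?_eq_none (by rw [List.length_reverse, hlen]; omega),
        List.getElem?_eq_none (by rw [hlen]; omega)]

lemma pv_isPos_iff (t : String) :
    isPositiveCycle t = true ↔ (t.toList.length % 2 = 1 ∧ t.toList.reverse = t.toList) := by
  unfold isPositiveCycle
  rw [PySem.Str.len_eq, PySem.Int.mod_eq_emod_of_pos (by norm_num)]
  split
  · rename_i h
    simp only [beq_iff_eq] at h
    constructor
    · intro hf; exact absurd hf (by simp)
    · rintro ⟨h1, _⟩; omega
  · rename_i h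
    simp only [beq_iff_eq] at h
    simp only [beq_iff_eq]
    constructor
    · intro he; exact ⟨by omega, he.symm⟩
    · rintro ⟨_, h2⟩; exact h2.symm

lemma pv_sl_toList (s : String) (i j : Int) (hi : 0 ≤ i) (hj : 0 ≤ j) :
    (pvSl s i j).toList = (s.toList.drop i.toNat).take (j.toNat + 1 - i.toNat) := by
  unfold pvSl
  rw [PySem.Str.toList_slice, PySem.Chars.slice_eq_listSlice,
    PySem.List.slice_toNat s.toList (a := i) (b := j+1) hi (by omega)]
  congr 1
  omega

lemma pv_mem_LAll (s t : String) :
    t ∈ pvLAll s ↔ ∃ i j : Int, 0 ≤ i ∧ i ≤ j ∧ j < (s.toList.length : Int) ∧ t = pvSl s i j := by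
  simp only [pvLAll, List.mem_flatMap, List.mem_map, PySem.List.mem_pyRange_one, PySem.Str.len_eq]
  constructor
  · rintro ⟨i, ⟨hi0, hin⟩, j, ⟨hij, hjn⟩, rfl⟩
    exact ⟨i, j, hi0, hij, hjn, rfl⟩
  · rintro ⟨i, j, hi0, hij, hjn, rfl⟩
    exact ⟨i, ⟨hi0, by omega⟩, j, ⟨hij, hjn⟩, rfl⟩

lemma pv_pal_core (s : String) (t : String) :
    (∃ c ∈ PySem.List.pyRange 0 (PySem.Str.len s) 1, ∃ m : Int, 0 ≤ m ∧
        (∀ j : Int, 0 ≤ j → j ≤ m →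
          j ≤ c ∧ c + j < PySem.Str.len s ∧
            PySem.Str.pyGet? s (c - j) = PySem.Str.pyGet? s (c + j)) ∧
        t = pvSl s (c - m) (c + m))
    ↔ t ∈ pvLAll s ∧ isPositiveCycle t = true := by
  have hre : PySem.Str.pyGet? s = PySem.List.pyGet? s.toList := rfl
  rw [pv_mem_LAll, pv_isPos_iff]
  simp only [PySem.List.mem_pyRange_one, PySem.Str.len_eq] at *
  constructor
  · rintro ⟨c, ⟨hc0, hcn⟩, m, hm0, hcond, rfl⟩
    have hM := hcond m hm0 le_rfl
    have hmc : m ≤ c := hM.1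
    have hcmn : c + m < (s.toList.length : Int) := hM.2.1
    have hT : (pvSl s (c - m) (c + m)).toList =
        (s.toList.drop (c.toNat - m.toNat)).take (2 * m.toNat + 1) := by
      rw [pv_sl_toList s _ _ (by omega) (by omega)]
      congr 2 <;> omega
    have hpairs : ∀ d : Nat, d ≤ m.toNat →
        s.toList[c.toNat - d]? = s.toList[c.toNat + d]? := by
      intro d hd
      have h := (hcond d (by omega) (by omega)).2.2
      rw [hre, PySem.List.pyGet?_of_nonneg _ (by omega),
        PySem.List.pyGet?_of_nonneg _ (by omega)] at h
      have e1 : (c - (d : Int)).toNat = c.toNat - d := by omega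
      have e2 : (c + (d : Int)).toNat = c.toNat + d := by omega
      rwa [e1, e2] at h
    have hlen : (pvSl s (c - m) (c + m)).toList.length = 2 * m.toNat + 1 := by
      rw [hT]
      simp only [List.length_take, List.length_drop]
      omega
    refine ⟨⟨c - m, c + m, by omega, by omega, by omega, rfl⟩, by omega, ?_⟩
    rw [hT]
    exact (pv_rev_iff s.toList c.toNat m.toNat (by omega) (by omega)).2 hpairs
  · rintro ⟨⟨i, j, hi0, hij, hjn, rfl⟩, hodd, hrev⟩
    have hT : (pvSl s i j).toList = (s.toList.drop i.toNat).take (j.toNat + 1 - i.toNat) :=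
      pv_sl_toList s i j hi0 (by omega)
    have hlen : (pvSl s i j).toList.length = j.toNat + 1 - i.toNat := by
      rw [hT]
      simp only [List.length_take, List.length_drop]
      omega
    rw [hlen] at hodd
    obtain ⟨mN, hmN⟩ : ∃ mN : Nat, j.toNat + 1 - i.toNat = 2 * mN + 1 :=
      ⟨(j.toNat - i.toNat) / 2, by omega⟩
    set cN : Nat := i.toNat + mN with hcN
    have hT' : (pvSl s i j).toList = (s.toList.drop (cN - mN)).take (2 * mN + 1) := by
      rw [hT]
      congr 2
      omega
    have hpairs := (pv_rev_iff s.toList cN mN (by omega) (by omega)).1 (by rw [← hT']; exact hrev)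
    refine ⟨(cN : Int), ⟨by omega, by omega⟩, (mN : Int), by omega, ?_, ?_⟩
    · intro d hd0 hdm
      refine ⟨by omega, by omega, ?_⟩
      have h := hpairs d.toNat (by omega)
      rw [hre, PySem.List.pyGet?_of_nonneg _ (by omega),
        PySem.List.pyGet?_of_nonneg _ (by omega)]
      have e1 : ((cN : Int) - d).toNat = cN - d.toNat := by omega
      have e2 : ((cN : Int) + d).toNat = cN + d.toNat := by omega
      rw [e1, e2]
      exact h
    · have e1 : (cN : Int) - mN = i := by omega
      have e2 : (cN : Int) + mN = j := by omega
      rw [e1, e2]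

lemma pv_memPals (s : String) (t : String) :
    t ∈ (PySem.List.pyRange 0 (PySem.Str.len s) 1).foldl
        (fun acc c => pvExpand s (PySem.Str.len s) c acc 0) PySem.Set.empty
    ↔ t ∈ pvLAll s ∧ isPositiveCycle t = true := by
  rw [pv_mem_foldl_of_step _ _
    (fun c t => ∃ m : Int, 0 ≤ m ∧
        (∀ j : Int, 0 ≤ j → j ≤ m →
          j ≤ c ∧ c + j < PySem.Str.len s ∧
            PySem.Str.pyGet? s (c - j) = PySem.Str.pyGet? s (c + j)) ∧
        t = pvSl s (c - m) (c + m))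
    (fun acc c t => pv_mem_pvExpand s (PySem.Str.len s) c 0 acc t)]
  rw [← pv_pal_core s t]
  simp [PySem.Set.empty]

lemma pv_nodupPals (s : String) :
    ((PySem.List.pyRange 0 (PySem.Str.len s) 1).foldl
        (fun acc c => pvExpand s (PySem.Str.len s) c acc 0)
        (PySem.Set.empty : PySem.Set String)).Nodup := by
  exact pv_nodup_foldl_of_step _ _
    (fun acc c h => pv_nodup_pvExpand s (PySem.Str.len s) c 0 acc h) _ (by simp [PySem.Set.empty])

-- ----- cardinality bookkeeping -----
lemma pv_len_eq_card (xs : PySem.Set String) (h : xs.Nodup) :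
    PySem.Set.len xs = (xs.toFinset.card : Int) := by
  simp [PySem.Set.len, List.toFinset_card_of_nodup h]

-- ===== VERDICT (by name: the statement is the Claim_ definition above) =====
theorem howManyAntiGoodSubstrs_spec : Claim_equal_howManyAntiGoodSubstrs := by
  intro s _
  unfold Spec_howManyAntiGoodSubstrs howManyAntiGoodSubstrs howManyAntiGoodSubstrs_alt
  simp only []
  rw [pv_len_eq_card _ (pv_nodupA s), pv_len_eq_card _ (pv_nodupSubs s),
    pv_len_eq_card _ (pv_nodupPals s)]
  have hA : ((PySem.List.pyRange 0 (PySem.Str.len s) 1).foldl (fun sets i =>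
      (PySem.List.pyRange i (PySem.Str.len s) 1).foldl (fun sets j =>
        if !isPositiveCycle (PySem.Str.slice s (some i) (some (j + 1))) then
          PySem.Set.add sets (PySem.Str.slice s (some i) (some (j + 1)))
        else sets) sets) (PySem.Set.empty : PySem.Set String)).toFinset
      = (pvLAll s).toFinset.filter (fun t => ¬ isPositiveCycle t = true) := by
    ext t
    simp only [List.mem_toFinset, Finset.mem_filter, pv_memA]
    simp
  have hS : ((PySem.List.pyRange 0 (PySem.Str.len s) 1).foldl (fun acc i =>
      (PySem.List.pyRange i (PySem.Str.len s) 1).foldl (fun acc j =>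
        PySem.Set.add acc (PySem.Str.slice s (some i) (some (j + 1)))) acc)
      (PySem.Set.empty : PySem.Set String)).toFinset = (pvLAll s).toFinset := by
    ext t
    simp only [List.mem_toFinset, pv_memSubs]
  have hP : ((PySem.List.pyRange 0 (PySem.Str.len s) 1).foldl
      (fun acc c => pvExpand s (PySem.Str.len s) c acc 0)
      (PySem.Set.empty : PySem.Set String)).toFinset
      = (pvLAll s).toFinset.filter (fun t => isPositiveCycle t = true) := by
    ext t
    simp only [List.mem_toFinset, Finset.mem_filter, pv_memPals]
  rw [hA, hS, hP]
  have hsplit := Finset.card_filter_add_card_filter_not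
    (s := (pvLAll s).toFinset) (fun t => isPositiveCycle t = true)
  omega
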